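-- pv_equiv track=rewrite | github.com/mahirkabir/best-practice-tracker | check_unused_dup_all_tags.py | count_unused
-- ===== SOURCE A (Python) =====
-- def count_unused(content):
--     """Find number of unused dependencies in `content`"""
--     try:
--         cnt = 0
--         lines = content.split("\n")
--
--         for line in lines:
--             if "* " in line and not ": " in line:
--                 cnt += 1
--             if "Path . does not contain a package.json file" in line:
--                 cnt = -2
--                 break
--
--         return cnt
--     except:
--         return -1
-- ===== SOURCE B (Python) =====
-- def count_unused(content):
--     """Find number of unused dependencies in `content`"""
--     try:
--         lines = content.split("\n")
--         if any("Path . does not contain a package.json file" in line for line in lines):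
--             return -2
--         return sum(1 for line in lines if "* " in line and ": " not in line)
--     except:
--         return -1
-- ===== Notes on version B (the rewrite author's own statement) =====
-- stated objective: simpler
-- what changed: A's single loop that interleaves counting with a sentinel check and break is split into two separate passes: an any() membership pass that returns -2, then a sum() of a generator counting marker lines.
import Mathlib
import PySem

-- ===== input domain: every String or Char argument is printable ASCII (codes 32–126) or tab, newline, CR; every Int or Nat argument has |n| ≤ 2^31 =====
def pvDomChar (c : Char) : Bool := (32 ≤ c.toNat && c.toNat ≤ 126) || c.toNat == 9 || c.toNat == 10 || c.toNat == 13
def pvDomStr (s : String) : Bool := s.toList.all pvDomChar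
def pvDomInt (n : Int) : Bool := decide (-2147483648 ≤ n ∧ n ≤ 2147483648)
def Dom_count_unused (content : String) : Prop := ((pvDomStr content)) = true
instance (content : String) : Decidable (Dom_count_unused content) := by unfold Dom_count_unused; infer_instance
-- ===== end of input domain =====

-- B replaces A's single counting-loop-with-break by two separate passes (sentinel membership, then a count); equivalence proved for all strings.


-- ===== PORT A =====
-- A's for-loop with break, as structural recursion over the lines with the running counter
def count_unused_loop (lines : List String) (cnt : Int) : Int :=
  match lines with
  | [] => cnt
  | line :: rest =>
    let cnt := if PySem.Str.isIn "* " line && !(PySem.Str.isIn ": " line) then cnt + 1 else cnt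
    if PySem.Str.isIn "Path . does not contain a package.json file" line then -2
    else count_unused_loop rest cnt

def count_unused (content : String) : Int :=
  count_unused_loop ((PySem.Str.split? content "\n").getD []) 0

-- ===== PORT B =====
def count_unused_alt (content : String) : Int :=
  let lines := (PySem.Str.split? content "\n").getD []
  if lines.any (fun line => PySem.Str.isIn "Path . does not contain a package.json file" line) then -2
  else (lines.countP (fun line => PySem.Str.isIn "* " line && !(PySem.Str.isIn ": " line)) : Int)

-- ===== PRECONDITION & SPEC =====
def Spec_count_unused (content : String) (out : Int) : Prop := out = count_unused_alt content
instance (content : String) (out : Int) : Decidable (Spec_count_unused content out) := by unfold Spec_count_unused; infer_instance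

-- ===== CLAIM (what is proved, stated in full; the proofs are below) =====
def Claim_equal_count_unused : Prop := ∀ (content : String), Dom_count_unused content → Spec_count_unused content (count_unused content)

-- ===== LEMMAS AND PROOFS =====
-- A's loop equals: -2 if the sentinel occurs in some line, else cnt + number of marker lines.
theorem count_unused_loop_eq (lines : List String) (cnt : Int) :
    count_unused_loop lines cnt =
      if lines.any (fun line => PySem.Str.isIn "Path . does not contain a package.json file" line) then -2
      else cnt + (lines.countP (fun line => PySem.Str.isIn "* " line && !(PySem.Str.isIn ": " line)) : Int) := by
  induction lines generalizing cnt with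
  | nil => simp [count_unused_loop]
  | cons line rest ih =>
    show (let cnt' := if PySem.Str.isIn "* " line && !(PySem.Str.isIn ": " line) then cnt + 1 else cnt;
          if PySem.Str.isIn "Path . does not contain a package.json file" line then -2
          else count_unused_loop rest cnt') = _
    rw [List.any_cons, List.countP_cons]
    cases hS : PySem.Str.isIn "Path . does not contain a package.json file" line <;>
      cases hM : (PySem.Str.isIn "* " line && !(PySem.Str.isIn ": " line)) <;>
        simp only [Bool.true_or, Bool.false_or, if_true, ih] <;>
        cases hR : rest.any (fun line => PySem.Str.isIn "Path . does not contain a package.json file" line) <;>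
          (simp; try push_cast; try ring)

-- ===== VERDICT (by name: the statement is the Claim_ definition above) =====
theorem count_unused_spec : Claim_equal_count_unused := by
  intro content _
  unfold Spec_count_unused count_unused count_unused_alt
  rw [count_unused_loop_eq]
  simp
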